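-- pv_equiv track=rewrite | github.com/Ag3497120/verantyx-v6 | arc/world_commands.py | sym_h
-- ===== SOURCE A (Python) =====
-- from collections import Counter, defaultdict
--
-- def _bg(g):
--     c = Counter()
--     for row in g: c.update(row)
--     return c.most_common(1)[0][0]
--
-- def _copy(g):
--     return [row[:] for row in g]
--
-- def sym_h(g):
--     bg=_bg(g); h,w=len(g),len(g[0]); res=_copy(g)
--     for r in range(h):
--         for c in range(w//2):
--             mc=w-1-c
--             if res[r][c]==bg and res[r][mc]!=bg: res[r][c]=res[r][mc]
--             elif res[r][mc]==bg and res[r][c]!=bg: res[r][mc]=res[r][c]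
--     return res
-- ===== SOURCE B (Python) =====
-- from collections import Counter
--
-- def sym_h(g):
--     bg = Counter(x for row in g for x in row).most_common(1)[0][0]
--     w = len(g[0])
--     return [[x if x != bg else row[w - 1 - c] for c, x in enumerate(row[:w])] + row[w:]
--             for row in g]
-- ===== Notes on version B (the rewrite author's own statement) =====
-- stated objective: simpler
-- what changed: B builds each output row fresh in one full-width comprehension pass (cell = x if x != bg else its mirror row[w-1-c], with the tail beyond width w kept as is), instead of A's copy-then-mutate with conditional in-place writes to both ends of each column pair over range(w//2).
import Mathlib
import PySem

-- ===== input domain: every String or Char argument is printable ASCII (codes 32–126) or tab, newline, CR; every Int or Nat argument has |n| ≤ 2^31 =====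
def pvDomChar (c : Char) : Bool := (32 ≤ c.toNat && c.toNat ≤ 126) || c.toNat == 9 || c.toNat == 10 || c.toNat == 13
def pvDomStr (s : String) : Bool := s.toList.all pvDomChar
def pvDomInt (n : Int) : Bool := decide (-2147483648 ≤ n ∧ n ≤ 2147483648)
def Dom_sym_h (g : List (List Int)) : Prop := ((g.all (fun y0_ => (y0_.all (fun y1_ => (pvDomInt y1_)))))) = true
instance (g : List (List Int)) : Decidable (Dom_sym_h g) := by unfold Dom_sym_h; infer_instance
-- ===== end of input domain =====

-- B builds each output row fresh in one full-width pass (mirror value where the cell is the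
-- background, tail beyond width w kept) instead of A's copy-then-mutate over half-width column
-- pairs; equivalence is proved on every input where A returns (Pre_).

-- ===== PORT A =====
-- c.most_common(1)[0][0]: sort the items by count, descending and stable, take the first key
-- (shared by both ports: both Pythons make this identical library call)
def pvMostCommon1 (d : PySem.Dict Int Int) : Int :=
  ((PySem.List.sorted d.items (fun p => p.2) true).headD (0, 0)).1

-- _bg: Counter updated row by row, then most_common(1)[0][0]
def pvBgA (g : List (List Int)) : Int :=
  pvMostCommon1
    (g.foldl (fun d row => row.foldl (fun d x => d.modify x 0 (· + 1)) d) PySem.Dict.empty)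

def sym_h (g : List (List Int)) : List (List Int) :=
  let bg := pvBgA g
  let h : Int := g.length
  let w : Int := (PySem.List.pyGetD g 0 []).length
  let res := g.map (fun row => PySem.List.slice row none none)   -- _copy: row[:] of each row
  (PySem.List.pyRange 0 h 1).foldl (fun res r =>
    (PySem.List.pyRange 0 (PySem.Int.floordiv w 2) 1).foldl (fun res c =>
      -- Python mutates the row object res[r] in place; here: read it, update, write it back
      let row := PySem.List.pyGetD res r []
      let mc := w - 1 - c
      let a := PySem.List.pyGetD row c 0
      let b := PySem.List.pyGetD row mc 0
      PySem.List.pySetD res r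
        (if a = bg ∧ b ≠ bg then PySem.List.pySetD row c b
         else if b = bg ∧ a ≠ bg then PySem.List.pySetD row mc a
         else row)) res) res

-- ===== PORT B =====
def sym_h_alt (g : List (List Int)) : List (List Int) :=
  let bg := pvMostCommon1 (PySem.Dict.counter (g.flatMap (fun row => row)))
  let w : Int := (PySem.List.pyGetD g 0 []).length
  g.map (fun row =>
    (PySem.List.enumerate (PySem.List.slice row none (some w)) 0).map
      (fun p => if p.2 ≠ bg then p.2 else PySem.List.pyGetD row (w - 1 - p.1) 0)
    ++ PySem.List.slice row (some w) none)

-- ===== PRECONDITION & SPEC =====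
-- Pre_ is exactly the set of inputs on which A returns: it excludes only empty g (IndexError on
-- g[0]), grids whose rows are all empty (most_common(1)[0] of an empty Counter raises IndexError)
-- and, when len(g[0]) >= 2, grids with a row shorter than len(g[0]) (IndexError inside the loop).
def Pre_sym_h (g : List (List Int)) : Prop :=
  g ≠ [] ∧ (∃ row ∈ g, row ≠ []) ∧
    (2 ≤ (g.headD []).length → ∀ row ∈ g, (g.headD []).length ≤ row.length)

instance (g : List (List Int)) : Decidable (Pre_sym_h g) := by unfold Pre_sym_h; infer_instance

def pvWitness_sym_h : List (List Int) := [[0, 1], [2, 0]]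

def Spec_sym_h (g : List (List Int)) (out : List (List Int)) : Prop := out = sym_h_alt g
instance (g : List (List Int)) (out : List (List Int)) : Decidable (Spec_sym_h g out) := by unfold Spec_sym_h; infer_instance

-- ===== CLAIM (what is proved, stated in full; the proofs are below) =====
def Claim_equal_sym_h : Prop := ∀ (g : List (List Int)), Dom_sym_h g → Pre_sym_h g → Spec_sym_h g (sym_h g)

-- ===== LEMMAS AND PROOFS =====

-- the per-cell selection formula, Nat-indexed
def pvSel (bg : Int) (row : List Int) (w j : Nat) : Int :=
  if j < w then
    (if row.getD j 0 ≠ bg then row.getD j 0 else row.getD (w - 1 - j) 0)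
  else row.getD j 0

-- A's inner-loop body acting on a single row
def pvRowStep (bg : Int) (w : Int) (row : List Int) (c : Int) : List Int :=
  let mc := w - 1 - c
  let a := PySem.List.pyGetD row c 0
  let b := PySem.List.pyGetD row mc 0
  if a = bg ∧ b ≠ bg then PySem.List.pySetD row c b
  else if b = bg ∧ a ≠ bg then PySem.List.pySetD row mc a
  else row

lemma pv_getD_set {α : Type} (xs : List α) (n j : Nat) (v d : α) :
    (xs.set n v).getD j d = if j = n ∧ n < xs.length then v else xs.getD j d := by
  simp only [List.getD_eq_getElem?_getD, List.getElem?_set]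
  split_ifs with h1 h2 h3 <;> simp_all

lemma pv_length_rowStep (bg : Int) (w : Int) (row : List Int) (c : Int) :
    (pvRowStep bg w row c).length = row.length := by
  unfold pvRowStep
  dsimp only
  split_ifs <;> simp [PySem.List.length_pySetD]

lemma pv_length_foldl_rowStep (bg : Int) (w : Int) (cs : List Int) (L : List Int) :
    (cs.foldl (pvRowStep bg w) L).length = L.length := by
  induction cs generalizing L with
  | nil => rfl
  | cons c cs ih => rw [List.foldl_cons, ih, pv_length_rowStep]

lemma pv_inner (bg : Int) (w : Nat) (row : List Int) (n : Nat) (hwn : 2 ≤ w → w ≤ n) :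
    ∀ (m k : Nat), k + m = w / 2 → ∀ (L : List Int), L.length = n →
      (∀ j, j < n → L.getD j 0 =
        if j < k ∨ (w - 1 - j < k ∧ j < w) then pvSel bg row w j else row.getD j 0) →
      ∀ j, j < n →
        ((PySem.List.pyRange (k : Int) ((w / 2 : Nat) : Int) 1).foldl (pvRowStep bg (w : Int)) L).getD j 0
          = pvSel bg row w j := by
  intro m
  induction m with
  | zero =>
    intro k hk L hL hinv j hj
    rw [PySem.List.pyRange_one_eq_nil (by exact_mod_cast Nat.le_of_eq (by omega))]
    simp only [List.foldl_nil]
    rw [hinv j hj]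
    by_cases hc : j < k ∨ (w - 1 - j < k ∧ j < w)
    · rw [if_pos hc]
    · rw [if_neg hc]
      simp only [pvSel]
      by_cases hjw : j < w
      · rw [if_pos hjw, show w - 1 - j = j by omega]
        split_ifs <;> rfl
      · rw [if_neg hjw]
  | succ m ih =>
    intro k hk L hL hinv j hj
    have hklt : k < w / 2 := by omega
    have h2 : 2 * k + 2 ≤ w := by omega
    have hn : w ≤ n := hwn (by omega)
    rw [PySem.List.pyRange_one_cons (by exact_mod_cast hklt), List.foldl_cons]
    rw [show ((k : Int) + 1) = ((k + 1 : Nat) : Int) by push_cast; ring]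
    have hmc : (w : Int) - 1 - (k : Int) = ((w - 1 - k : Nat) : Int) := by omega
    have ha : L.getD k 0 = row.getD k 0 := by rw [hinv k (by omega), if_neg (by omega)]
    have hb : L.getD (w - 1 - k) 0 = row.getD (w - 1 - k) 0 := by
      rw [hinv (w - 1 - k) (by omega), if_neg (by omega)]
    have hsel_k : pvSel bg row w k =
        if row.getD k 0 ≠ bg then row.getD k 0 else row.getD (w - 1 - k) 0 := by
      simp only [pvSel]
      rw [if_pos (by omega : k < w)]
    have hsel_mc : pvSel bg row w (w - 1 - k) =
        if row.getD (w - 1 - k) 0 ≠ bg then row.getD (w - 1 - k) 0 else row.getD k 0 := by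
      simp only [pvSel]
      rw [if_pos (by omega : w - 1 - k < w), show w - 1 - (w - 1 - k) = k by omega]
    unfold pvRowStep
    dsimp only
    rw [hmc, PySem.List.pyGetD_natCast, PySem.List.pyGetD_natCast, ha, hb,
        PySem.List.pySetD_natCast, PySem.List.pySetD_natCast]
    split_ifs with h1 h2
    · -- res[c] = res[mc]
      refine ih (k + 1) (by omega) _ (by simp [hL]) (fun i hi => ?_) j hj
      rw [pv_getD_set, hL]
      by_cases hik : i = k
      · subst hik
        rw [if_pos ⟨rfl, by omega⟩, if_pos (by omega)]
        rw [hsel_k, if_neg (by simpa using h1.1)]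
      · rw [if_neg (by simp [hik])]
        rw [hinv i hi]
        by_cases hc : i < k ∨ (w - 1 - i < k ∧ i < w)
        · rw [if_pos hc, if_pos (by omega)]
        · by_cases hcn : i < k + 1 ∨ (w - 1 - i < k + 1 ∧ i < w)
          · -- only new index: i = w - 1 - k
            have hieq : i = w - 1 - k := by omega
            subst hieq
            rw [if_neg hc, if_pos hcn, hsel_mc, if_pos h1.2]
          · rw [if_neg hc, if_neg hcn]
    · -- res[mc] = res[c]
      refine ih (k + 1) (by omega) _ (by simp [hL]) (fun i hi => ?_) j hj
      rw [pv_getD_set, hL]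
      by_cases hik : i = w - 1 - k
      · subst hik
        rw [if_pos ⟨rfl, by omega⟩, if_pos (by omega)]
        rw [hsel_mc, if_neg (by simpa using h2.1)]
      · rw [if_neg (by simp [hik])]
        rw [hinv i hi]
        by_cases hc : i < k ∨ (w - 1 - i < k ∧ i < w)
        · rw [if_pos hc, if_pos (by omega)]
        · by_cases hcn : i < k + 1 ∨ (w - 1 - i < k + 1 ∧ i < w)
          · have hieq : i = k := by omega
            subst hieq
            rw [if_neg hc, if_pos hcn, hsel_k, if_pos h2.2]
          · rw [if_neg hc, if_neg hcn]
    · -- neither branch fires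
      refine ih (k + 1) (by omega) _ hL (fun i hi => ?_) j hj
      rw [hinv i hi]
      by_cases hc : i < k ∨ (w - 1 - i < k ∧ i < w)
      · rw [if_pos hc, if_pos (by omega)]
      · by_cases hcn : i < k + 1 ∨ (w - 1 - i < k + 1 ∧ i < w)
        · rw [if_neg hc, if_pos hcn]
          by_cases hik : i = k
          · rw [hik, hsel_k]
            by_cases habg : row.getD k 0 = bg
            · rw [if_neg (by simpa using habg)]
              have hbb : row.getD (w - 1 - k) 0 = bg := by tauto
              rw [habg, hbb]
            · rw [if_pos habg]
          · have hieq : i = w - 1 - k := by omega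
            rw [hieq, hsel_mc]
            by_cases hbbg : row.getD (w - 1 - k) 0 = bg
            · rw [if_neg (by simpa using hbbg)]
              have haa : row.getD k 0 = bg := by tauto
              rw [hbbg, haa]
            · rw [if_pos hbbg]
        · rw [if_neg hc, if_neg hcn]

-- A's full inner loop on one row equals B's comprehension row plus the untouched tail
lemma pv_row (bg : Int) (w : Nat) (row : List Int) (hwn : 2 ≤ w → w ≤ row.length) :
    (PySem.List.pyRange 0 ((w / 2 : Nat) : Int) 1).foldl (pvRowStep bg (w : Int)) row
      = (PySem.List.enumerate (row.take w) 0).map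
          (fun p => if p.2 ≠ bg then p.2 else PySem.List.pyGetD row ((w : Int) - 1 - p.1) 0)
        ++ row.drop w := by
  have hmain := pv_inner bg w row row.length hwn (w / 2) 0 (by omega) row rfl
    (fun j hj => by rw [if_neg (by omega)])
  rw [Nat.cast_zero] at hmain
  apply List.ext_getElem
  · rw [pv_length_foldl_rowStep]
    simp only [List.length_append, List.length_map, PySem.List.length_enumerate,
      List.length_take, List.length_drop]
    omega
  · intro j hjl hjr
    have hjw : j < row.length := by rw [pv_length_foldl_rowStep] at hjl; exact hjl
    rw [← List.getD_eq_getElem _ 0 hjl, hmain j hjw, ← List.getD_eq_getElem _ 0 hjr]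
    have hlen1 : ((PySem.List.enumerate (row.take w) 0).map
        (fun p => if p.2 ≠ bg then p.2 else PySem.List.pyGetD row ((w : Int) - 1 - p.1) 0)).length
        = min w row.length := by
      simp [PySem.List.length_enumerate]
    by_cases hjm : j < min w row.length
    · rw [List.getD_append _ _ _ j (by rw [hlen1]; exact hjm)]
      rw [List.getD_eq_getElem _ 0 (by rw [hlen1]; exact hjm)]
      rw [List.getElem_map, PySem.List.getElem_enumerate]
      simp only [zero_add, List.getElem_take]
      simp only [pvSel, if_pos (by omega : j < w)]
      rw [show ((w : Int) - 1 - (j : Int)) = ((w - 1 - j : Nat) : Int) by omega,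
          PySem.List.pyGetD_natCast]
      rw [List.getD_eq_getElem row 0 hjw]
    · rw [List.getD_append_right _ _ _ j (by rw [hlen1]; omega)]
      rw [hlen1]
      simp only [pvSel, if_neg (by omega : ¬ j < w)]
      conv_rhs => rw [List.getD_eq_getElem?_getD, List.getElem?_drop]
      rw [show w + (j - min w row.length) = j by omega, ← List.getD_eq_getElem?_getD]

-- a grid fold that only rewrites row r is the row fold written back once
lemma pv_commute (F : List Int → Int → List Int) (cs : List Int)
    (res : List (List Int)) (r : Nat) (hr : r < res.length) :
    cs.foldl (fun res c => PySem.List.pySetD res (r : Int)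
        (F (PySem.List.pyGetD res (r : Int) []) c)) res
      = PySem.List.pySetD res (r : Int)
          (cs.foldl F (PySem.List.pyGetD res (r : Int) [])) := by
  induction cs generalizing res with
  | nil =>
    rw [List.foldl_nil, List.foldl_nil, PySem.List.pySetD_natCast, PySem.List.pyGetD_natCast,
        List.getD_eq_getElem _ _ hr, List.set_getElem_self]
  | cons c cs ih =>
    rw [List.foldl_cons, List.foldl_cons]
    rw [ih _ (by rw [PySem.List.length_pySetD]; exact hr)]
    rw [PySem.List.pySetD_natCast, PySem.List.pySetD_natCast, PySem.List.pySetD_natCast,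
        PySem.List.pyGetD_natCast, PySem.List.pyGetD_natCast]
    rw [pv_getD_set]
    rw [if_pos ⟨rfl, hr⟩, List.set_set]

-- outer loop: processing rows [k, h) of the partially rewritten grid maps the row fold over the rest
lemma pv_outer (F : List Int → Int → List Int) (cs : List Int) (g : List (List Int)) :
    ∀ (m k : Nat), k + m = g.length →
      (PySem.List.pyRange (k : Int) (g.length : Int) 1).foldl
        (fun res r => cs.foldl (fun res c => PySem.List.pySetD res r
            (F (PySem.List.pyGetD res r []) c)) res)
        ((g.take k).map (fun L => cs.foldl F L) ++ g.drop k)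
      = g.map (fun L => cs.foldl F L) := by
  intro m
  induction m with
  | zero =>
    intro k hk
    have hkl : k = g.length := by omega
    subst hkl
    rw [PySem.List.pyRange_one_eq_nil (le_refl _), List.foldl_nil, List.take_length,
        List.drop_length, List.append_nil]
  | succ m ih =>
    intro k hk
    have hklt : k < g.length := by omega
    rw [PySem.List.pyRange_one_cons (by exact_mod_cast hklt), List.foldl_cons]
    have hSlen : ((g.take k).map (fun L => cs.foldl F L) ++ g.drop k).length = g.length := by
      simp only [List.length_append, List.length_map, List.length_take, List.length_drop]
      omega
    rw [pv_commute F cs _ k (by rw [hSlen]; exact hklt)]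
    have hgd : PySem.List.pyGetD ((g.take k).map (fun L => cs.foldl F L) ++ g.drop k) (k : Int) []
        = g[k] := by
      rw [PySem.List.pyGetD_natCast, List.getD_eq_getElem?_getD, List.getElem?_append_right
        (by simp only [List.length_map, List.length_take]; omega)]
      rw [List.drop_eq_getElem_cons hklt]
      simp only [List.length_map, List.length_take, List.getElem?_cons]
      rw [if_pos (by omega : k - min k g.length = 0)]
      rfl
    rw [hgd, PySem.List.pySetD_natCast]
    have hset : (((g.take k).map (fun L => cs.foldl F L) ++ g.drop k)).set k (cs.foldl F g[k])
        = (g.take (k + 1)).map (fun L => cs.foldl F L) ++ g.drop (k + 1) := by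
      rw [List.set_append_right _ _ (by simp only [List.length_map, List.length_take]; omega)]
      have hlm : ((g.take k).map (fun L => cs.foldl F L)).length = k := by
        simp only [List.length_map, List.length_take]; omega
      rw [hlm, Nat.sub_self, List.drop_eq_getElem_cons hklt, List.set_cons_zero]
      rw [List.take_add_one, List.getElem?_eq_getElem hklt]
      simp
      rw [List.take_add_one, List.getElem?_map, List.getElem?_eq_getElem hklt]
      simp
    rw [hset, show ((k : Int) + 1) = ((k + 1 : Nat) : Int) by push_cast; ring]
    exact ih (k + 1) (by omega)

lemma pv_bg_eq (g : List (List Int)) :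
    pvBgA g = pvMostCommon1 (PySem.Dict.counter (g.flatMap (fun row => row))) := by
  unfold pvBgA
  rw [show (g.foldl (fun d row => row.foldl (fun d x => d.modify x 0 (· + 1)) d)
        (PySem.Dict.empty : PySem.Dict Int Int))
      = PySem.Dict.counter (g.flatMap (fun row => row)) from by
    rw [PySem.Dict.counter_eq_foldl, List.flatMap_def, List.foldl_flatten, List.foldl_map]]

-- the whole rewritten grid of A equals B's comprehension grid
lemma pv_main (bg : Int) (g : List (List Int)) (w : Nat)
    (hrect : ∀ row ∈ g, 2 ≤ w → w ≤ row.length) :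
    (PySem.List.pyRange 0 ((g.length : Nat) : Int) 1).foldl
        (fun res r => (PySem.List.pyRange 0 ((w / 2 : Nat) : Int) 1).foldl
          (fun res c => PySem.List.pySetD res r
            (pvRowStep bg (w : Int) (PySem.List.pyGetD res r []) c)) res) g
      = g.map (fun row =>
          (PySem.List.enumerate (row.take w) 0).map
            (fun p => if p.2 ≠ bg then p.2 else PySem.List.pyGetD row ((w : Int) - 1 - p.1) 0)
          ++ row.drop w) := by
  have h0 := pv_outer (pvRowStep bg (w : Int)) (PySem.List.pyRange 0 ((w / 2 : Nat) : Int) 1)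
    g g.length 0 (by omega)
  rw [Nat.cast_zero, List.take_zero, List.map_nil, List.drop_zero, List.nil_append] at h0
  rw [h0]
  exact List.map_congr_left (fun row hrow => pv_row bg w row (hrect row hrow))

-- ===== VERDICT (by name: the statement is the Claim_ definition above) =====
theorem sym_h_spec : Claim_equal_sym_h := by
  intro g _ hpre
  obtain ⟨hne, -, hrect⟩ := hpre
  unfold Spec_sym_h sym_h sym_h_alt
  dsimp only
  rw [pv_bg_eq]
  have hget0 : PySem.List.pyGetD g 0 [] = g.headD [] := by
    cases g with
    | nil => exact absurd rfl hne
    | cons a l => rw [PySem.List.pyGetD_zero_cons]; rfl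
  rw [hget0]
  rw [show (g.map fun row => PySem.List.slice row none none) = g by
    simp [PySem.List.slice_none_none]]
  rw [show PySem.Int.floordiv ((g.headD []).length : Int) 2
      = (((g.headD []).length / 2 : Nat) : Int) by
    exact_mod_cast PySem.Int.floordiv_natCast (g.headD []).length 2]
  simp only [PySem.List.slice_to_natCast, PySem.List.slice_from_natCast]
  exact pv_main _ g (g.headD []).length (fun row hrow h2 => hrect h2 row hrow)
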